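-- pv_equiv track=rewrite | github.com/Nikita5543/New-SSO-02 | backend/app/plugins/vlan/endpoints.py | parse_vlan_ids
-- ===== SOURCE A (Python) =====
-- from typing import List, Optional
--
-- def parse_vlan_ids(vlan_string: Optional[str]) -> List[int]:
--     """Парсит строку VLAN ID в список чисел.
--     Поддерживает форматы: '100', '100;200;300', '100,200,300'
--     """
--     if not vlan_string:
--         return []
--
--     vlan_ids = []
--     # Разделяем по разделителям (; , или пробел)
--     separators = [';', ',', ' ', '|']
--     parts = [vlan_string]
--
--     for sep in separators:
--         new_parts = []
--         for part in parts:
--             new_parts.extend(part.split(sep))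
--         parts = new_parts
--
--     for part in parts:
--         part = part.strip()
--         if part.isdigit():
--             vlan_id = int(part)
--             if 1 <= vlan_id <= 4094:  # Валидный диапазон VLAN
--                 vlan_ids.append(vlan_id)
--
--     return vlan_ids
-- ===== SOURCE B (Python) =====
-- from typing import List, Optional
--
-- def parse_vlan_ids(vlan_string: Optional[str]) -> List[int]:
--     """Single-pass tokenizer: scan the string once, cutting a token at each
--     separator character, validating each token as it is completed."""
--     if not vlan_string:
--         return []
--
--     vlan_ids = []
--     token = []
--     for ch in vlan_string + ';':  # sentinel separator flushes the last token
--         if ch in ';, |':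
--             part = ''.join(token).strip()
--             token = []
--             if part.isdigit():
--                 vlan_id = int(part)
--                 if 1 <= vlan_id <= 4094:
--                     vlan_ids.append(vlan_id)
--         else:
--             token.append(ch)
--     return vlan_ids
-- ===== Notes on version B (the rewrite author's own statement) =====
-- stated objective: simpler
-- what changed: Replaces the four sequential whole-list split passes (one per separator) by a single left-to-right character scan that cuts a token at each separator and validates it immediately with the same strip/isdigit/range check.
import Mathlib
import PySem

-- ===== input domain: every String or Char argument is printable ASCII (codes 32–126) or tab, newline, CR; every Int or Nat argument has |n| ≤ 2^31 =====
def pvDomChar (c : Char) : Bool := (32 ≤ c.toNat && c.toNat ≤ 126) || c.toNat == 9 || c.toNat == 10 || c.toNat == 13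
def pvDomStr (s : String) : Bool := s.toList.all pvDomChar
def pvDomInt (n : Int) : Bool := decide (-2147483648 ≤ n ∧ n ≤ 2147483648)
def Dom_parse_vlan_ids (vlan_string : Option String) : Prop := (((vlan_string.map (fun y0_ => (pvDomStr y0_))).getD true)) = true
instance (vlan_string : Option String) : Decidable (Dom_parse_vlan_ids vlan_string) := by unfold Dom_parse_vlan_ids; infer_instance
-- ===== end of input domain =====

-- B replaces A's four sequential whole-string split passes by one left-to-right character
-- scan with the same strip/isdigit/range validation (objective: simpler).

-- ===== PORT A =====
-- A: split [vlan_string] sequentially by each of ';' ',' ' ' '|', then validate each part.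
-- (int(part) is guarded by part.isdigit(), so PySem.Int.ofChars? is `some` wherever it is read;
--  the `none` branch only keeps the match total.)
def parse_vlan_ids (vlan_string : Option String) : List Int :=
  match vlan_string with
  | none => []
  | some s =>
    if s.toList = [] then []   -- `if not vlan_string`
    else
      let parts := [';', ',', ' ', '|'].foldl
        (fun parts sep => parts.foldl (fun np part => np ++ PySem.Chars.splitOn part [sep]) [])
        [s.toList]
      parts.foldl
        (fun acc part =>
          let p := PySem.Chars.strip part
          if PySem.Chars.strIsdigit p then
            match PySem.Int.ofChars? p with
            | some v => if 1 ≤ v ∧ v ≤ 4094 then acc ++ [v] else acc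
            | none => acc
          else acc)
        []

-- ===== PORT B =====
-- B's scanner: cut a token at each separator char, validate it immediately.
def pvTokGo : List Char → List Char → List Int → List Int
  | [], _, acc => acc
  | c :: rest, tok, acc =>
    if c ∈ [';', ',', ' ', '|'] then
      let p := PySem.Chars.strip tok
      let acc' :=
        if PySem.Chars.strIsdigit p then
          match PySem.Int.ofChars? p with
          | some v => if 1 ≤ v ∧ v ≤ 4094 then acc ++ [v] else acc
          | none => acc
        else acc
      pvTokGo rest [] acc'
    else pvTokGo rest (tok ++ [c]) acc

def parse_vlan_ids_alt (vlan_string : Option String) : List Int :=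
  match vlan_string with
  | none => []
  | some s =>
    if s.toList = [] then []   -- `if not vlan_string`
    else pvTokGo (s.toList ++ [';']) [] []   -- sentinel separator flushes the last token

-- ===== PRECONDITION & SPEC =====
def Spec_parse_vlan_ids (vlan_string : Option String) (out : List Int) : Prop := out = parse_vlan_ids_alt vlan_string
instance (vlan_string : Option String) (out : List Int) : Decidable (Spec_parse_vlan_ids vlan_string out) := by unfold Spec_parse_vlan_ids; infer_instance

-- ===== CLAIM (what is proved, stated in full; the proofs are below) =====
def Claim_equal_parse_vlan_ids : Prop := ∀ (vlan_string : Option String), Dom_parse_vlan_ids vlan_string → Spec_parse_vlan_ids vlan_string (parse_vlan_ids vlan_string)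

-- ===== LEMMAS AND PROOFS =====

-- proof-side vocabulary: the separator predicate and the per-token validation
def pvSep (c : Char) : Bool := c == ';' || c == ',' || c == ' ' || c == '|'

def pvEmit (tok : List Char) : List Int :=
  let p := PySem.Chars.strip tok
  if PySem.Chars.strIsdigit p then
    match PySem.Int.ofChars? p with
    | some v => if 1 ≤ v ∧ v ≤ 4094 then [v] else []
    | none => []
  else []

theorem pv_splitOn_go_spec (c : Char) (fuel : Nat) (l cur : List Char) (acc : List (List Char))
    (h : l.length ≤ fuel) :
    PySem.Chars.splitOn.go [c] fuel l cur acc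
      = acc.reverse ++ List.modifyHead (cur.reverse ++ ·) (List.splitOnP (· == c) l) := by
  induction fuel generalizing l cur acc with
  | zero =>
    have : l = [] := by cases l <;> simp_all
    subst this
    simp [PySem.Chars.splitOn.go]
  | succ f ih =>
    cases l with
    | nil => simp [PySem.Chars.splitOn.go]
    | cons ch rest =>
      rw [PySem.Chars.splitOn.go]
      by_cases hc : ch = c
      · rw [if_pos (by simp [List.isPrefixOf, hc])]
        rw [ih _ _ _ (by simpa using Nat.le_of_succ_le_succ h)]
        obtain ⟨h0, t0, ht⟩ := List.exists_cons_of_ne_nil (List.splitOnP_ne_nil (· == c) rest)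
        rw [List.splitOnP_cons, if_pos (by simp [hc])]
        simp [ht]
      · rw [if_neg (by simp [List.isPrefixOf]; exact fun hh => hc hh.symm)]
        rw [ih _ _ _ (by simpa using Nat.le_of_succ_le_succ h)]
        rw [List.splitOnP_cons, if_neg (by simp [hc])]
        obtain ⟨h0, t0, ht⟩ := List.exists_cons_of_ne_nil (List.splitOnP_ne_nil (· == c) rest)
        rw [ht]
        simp

theorem pv_splitOn_singleton (cs : List Char) (c : Char) :
    PySem.Chars.splitOn cs [c] = List.splitOnP (· == c) cs := by
  rw [PySem.Chars.splitOn, pv_splitOn_go_spec c _ _ _ _ (by omega)]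
  obtain ⟨h0, t0, ht⟩ := List.exists_cons_of_ne_nil (List.splitOnP_ne_nil (· == c) cs)
  rw [ht]
  simp

theorem pv_splitOnP_or {α : Type} (p q : α → Bool) (l : List α) :
    (List.splitOnP p l).flatMap (List.splitOnP q) = List.splitOnP (fun a => p a || q a) l := by
  induction l with
  | nil => simp
  | cons a t ih =>
    rw [List.splitOnP_cons, List.splitOnP_cons]
    cases hpa : p a
    · obtain ⟨h0, t0, ht⟩ := List.exists_cons_of_ne_nil (List.splitOnP_ne_nil p t)
      rw [ht] at ih ⊢
      rw [List.flatMap_cons] at ih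
      cases hqa : q a
      · obtain ⟨g0, g1, hg⟩ := List.exists_cons_of_ne_nil (List.splitOnP_ne_nil q h0)
        rw [hg] at ih
        simp only [Bool.false_or, hqa, List.modifyHead_cons, if_neg (Bool.false_ne_true),
          List.flatMap_cons, List.splitOnP_cons, hg, ← ih]
        simp
      · simp only [Bool.false_or, hqa, List.modifyHead_cons, if_neg (Bool.false_ne_true), if_pos rfl,
          List.flatMap_cons, List.splitOnP_cons, ← ih]
        simp
    · simp only [Bool.true_or, if_pos rfl, List.flatMap_cons]
      simpa using ih

theorem pv_splitOnP_clean {α : Type} (p : α → Bool) (l : List α) (h : ∀ x ∈ l, p x = false) :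
    List.splitOnP p l = [l] := by
  induction l with
  | nil => simp
  | cons a t ih =>
    rw [List.splitOnP_cons, if_neg (by simp [h a (by simp)]), ih (fun x hx => h x (by simp [hx]))]
    rfl

theorem pv_splitOnP_append_cons {α : Type} (p : α → Bool) (pre : List α) (x : α) (rest : List α)
    (hpre : ∀ a ∈ pre, p a = false) (hx : p x = true) :
    List.splitOnP p (pre ++ x :: rest) = pre :: List.splitOnP p rest := by
  induction pre with
  | nil => simp [List.splitOnP_cons, hx]
  | cons a t ih =>
    rw [List.cons_append, List.splitOnP_cons, if_neg (by simp [hpre a (by simp)]),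
      ih (fun b hb => hpre b (by simp [hb]))]
    rfl

theorem pv_a_parts (cs : List Char) :
    [';', ',', ' ', '|'].foldl
      (fun parts sep => parts.foldl (fun np part => np ++ PySem.Chars.splitOn part [sep]) [])
      [cs] = List.splitOnP pvSep cs := by
  simp only [List.foldl_cons, List.foldl_nil,
    PySem.List.foldl_append_eq_flatMap (fun part => PySem.Chars.splitOn part _)]
  simp only [List.nil_append, pv_splitOn_singleton, List.flatMap_singleton,
    pv_splitOnP_or]
  have : (fun a => (((a == ';' || a == ',') || a == ' ') || a == '|')) = pvSep := by
    funext a; simp [pvSep, Bool.or_assoc]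
  rw [this]

theorem pv_step (a : List Int) (pt : List Char) :
    (if PySem.Chars.strIsdigit (PySem.Chars.strip pt) then
       match PySem.Int.ofChars? (PySem.Chars.strip pt) with
       | some v => if 1 ≤ v ∧ v ≤ 4094 then a ++ [v] else a
       | none => a
     else a) = a ++ pvEmit pt := by
  simp only [pvEmit]
  by_cases hd : PySem.Chars.strIsdigit (PySem.Chars.strip pt) = true
  · simp only [hd, if_pos]
    cases h : PySem.Int.ofChars? (PySem.Chars.strip pt) with
    | none => simp
    | some v => by_cases hr : 1 ≤ v ∧ v ≤ 4094 <;> simp [hr]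
  · simp [hd]

theorem pv_a_validate (parts : List (List Char)) (acc : List Int) :
    parts.foldl
      (fun acc part =>
        let p := PySem.Chars.strip part
        if PySem.Chars.strIsdigit p then
          match PySem.Int.ofChars? p with
          | some v => if 1 ≤ v ∧ v ≤ 4094 then acc ++ [v] else acc
          | none => acc
        else acc)
      acc = acc ++ parts.flatMap pvEmit := by
  induction parts generalizing acc with
  | nil => simp
  | cons part t ih =>
    rw [List.foldl_cons]
    show t.foldl _ (if PySem.Chars.strIsdigit (PySem.Chars.strip part) then _ else acc) = _
    rw [pv_step, ih, List.flatMap_cons, List.append_assoc]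

theorem pv_tokGo_spec (cs tok : List Char) (acc : List Int)
    (htok : ∀ c ∈ tok, pvSep c = false) :
    pvTokGo (cs ++ [';']) tok acc = acc ++ (List.splitOnP pvSep (tok ++ cs)).flatMap pvEmit := by
  induction cs generalizing tok acc with
  | nil =>
    show pvTokGo [';'] tok acc = _
    rw [pvTokGo, if_pos (by simp)]
    show pvTokGo [] [] _ = _
    rw [pvTokGo, pv_step, List.append_nil,
      pv_splitOnP_clean pvSep tok htok]
    simp
  | cons c rest ih =>
    rw [List.cons_append, pvTokGo]
    by_cases hsep : pvSep c = true
    · rw [if_pos (by simp only [List.mem_cons, List.mem_singleton]; simp [pvSep] at hsep; tauto)]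
      show pvTokGo (rest ++ [';']) [] (if PySem.Chars.strIsdigit (PySem.Chars.strip tok) then _ else acc) = _
      rw [pv_step, ih [] (acc ++ pvEmit tok) (by simp)]
      rw [pv_splitOnP_append_cons pvSep tok c rest htok hsep]
      simp
    · rw [if_neg (by simp only [List.mem_cons, List.mem_singleton]; simp [pvSep] at hsep; tauto)]
      rw [ih (tok ++ [c]) acc (by
            intro x hx
            rcases List.mem_append.1 hx with h|h
            · exact htok x h
            · rw [List.mem_singleton.1 h]
              simp [pvSep] at hsep ⊢
              tauto)]
      simp

-- ===== VERDICT (by name: the statement is the Claim_ definition above) =====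
theorem parse_vlan_ids_spec : Claim_equal_parse_vlan_ids := by
  intro vs _
  unfold Spec_parse_vlan_ids
  match vs with
  | none => rfl
  | some s =>
    simp only [parse_vlan_ids, parse_vlan_ids_alt]
    by_cases h : s.toList = []
    · simp [h]
    · simp only [h, if_neg h, pv_a_parts, pv_a_validate,
        pv_tokGo_spec s.toList [] [] (by intro c hc; simp at hc)]
      simp
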